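-- pv_equiv track=rewrite | github.com/sabinbobu/tech-doc-assistant | src/ingestion/pdf_reader.py | _clean_page_text
-- ===== SOURCE A (Python) =====
-- def _clean_page_text(text: str) -> str:
--     """
--     Clean raw extracted text from a PDF page.
--
--     PDF text extraction is messy — you get:
--     - Extra whitespace from column layouts
--     - Hyphenated words split across lines
--     - Headers/footers repeated on every page
--     - Random line breaks in the middle of sentences
--
--     This is like cleaning up raw ADC readings —
--     you need to filter noise before the data is useful.
--
--     We keep this simple for now and can enhance later.
--     """
--     # Remove excessive blank lines (keep max 2 consecutive)
--     lines = text.split("\n")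
--     cleaned_lines: list[str] = []
--     blank_count = 0
--
--     for line in lines:
--         stripped = line.strip()
--         if not stripped:
--             blank_count += 1
--             if blank_count <= 1:
--                 cleaned_lines.append("")
--         else:
--             blank_count = 0
--             cleaned_lines.append(stripped)
--
--     # Rejoin and handle hyphenation at line breaks
--     # "auto-\nmatic" → "automatic"
--     result = "\n".join(cleaned_lines)
--     result = result.replace("-\n", "")
--
--     return result.strip()
-- ===== SOURCE B (Python) =====
-- def _clean_page_text(text: str) -> str:
--     stripped = [line.strip() for line in text.split("\n")]
--     collapsed = [cur for prev, cur in zip([None] + stripped, stripped)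
--                  if cur or prev != ""]
--     return "\n".join(collapsed).replace("-\n", "").strip()
-- ===== Notes on version B (the rewrite author's own statement) =====
-- stated objective: idiomatic
-- what changed: Replaces the stateful loop with a blank_count accumulator by a declarative pipeline: strip every line up front, then keep a line via a zip-with-previous comprehension (keep it if non-blank or the previous stripped line was non-blank), then join/replace/strip.
import Mathlib
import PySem

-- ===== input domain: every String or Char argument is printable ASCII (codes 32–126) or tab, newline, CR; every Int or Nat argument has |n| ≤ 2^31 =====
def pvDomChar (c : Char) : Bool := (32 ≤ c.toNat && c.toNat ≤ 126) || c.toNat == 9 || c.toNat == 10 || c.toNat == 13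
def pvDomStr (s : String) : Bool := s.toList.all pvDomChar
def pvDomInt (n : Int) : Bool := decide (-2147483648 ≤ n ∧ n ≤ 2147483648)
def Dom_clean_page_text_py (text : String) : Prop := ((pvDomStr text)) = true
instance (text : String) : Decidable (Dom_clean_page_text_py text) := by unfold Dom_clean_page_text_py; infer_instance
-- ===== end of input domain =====

-- B replaces A's stateful blank_count loop by a strip-map plus zip-with-previous filter (idiomatic, same cost).

-- ===== PORT A =====
-- loop body of A's for-loop (state = (blank_count, cleaned_lines))
def pvStepA (acc : Int × List String) (line : String) : Int × List String :=
  let stripped := PySem.Str.strip line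
  if stripped = "" then
    let bc := acc.1 + 1
    if bc ≤ 1 then (bc, acc.2 ++ [""]) else (bc, acc.2)
  else (0, acc.2 ++ [stripped])

def clean_page_text_py (text : String) : String :=
  let lines := (PySem.Str.split? text "\n").getD []   -- sep ≠ "", so split? is always some
  let st := lines.foldl pvStepA ((0 : Int), ([] : List String))
  let result := PySem.Str.join "\n" st.2
  let result := PySem.Str.replace result "-\n" ""
  PySem.Str.strip result

-- ===== PORT B =====
def clean_page_text_py_alt (text : String) : String :=
  let stripped := ((PySem.Str.split? text "\n").getD []).map PySem.Str.strip
  let collapsed := ((((none : Option String) :: stripped.map some).zip stripped).filter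
      (fun q => q.2 != "" || q.1 != some "")).map (·.2)
  PySem.Str.strip (PySem.Str.replace (PySem.Str.join "\n" collapsed) "-\n" "")

-- ===== PRECONDITION & SPEC =====
def Spec_clean_page_text_py (text : String) (out : String) : Prop := out = clean_page_text_py_alt text
instance (text : String) (out : String) : Decidable (Spec_clean_page_text_py text out) := by unfold Spec_clean_page_text_py; infer_instance

-- ===== CLAIM (what is proved, stated in full; the proofs are below) =====
def Claim_equal_clean_page_text_py : Prop := ∀ (text : String), Dom_clean_page_text_py text → Spec_clean_page_text_py text (clean_page_text_py text)

-- ===== LEMMAS AND PROOFS =====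

-- canonical collapse of a list of already-stripped lines; pb = "previous line was blank"
def pvCollapse (pb : Bool) : List String → List String
  | [] => []
  | s :: r => if s = "" then (if pb then pvCollapse true r else "" :: pvCollapse true r)
              else s :: pvCollapse false r

theorem pvA_loop (lines : List String) : ∀ (b : Int) (acc : List String), 0 ≤ b →
    (lines.foldl pvStepA (b, acc)).2
    = acc ++ pvCollapse (decide (b ≠ 0)) (lines.map PySem.Str.strip) := by
  induction lines with
  | nil => intro b acc hb; simp [pvCollapse]
  | cons l r ih =>
    intro b acc hb
    simp only [List.foldl_cons, List.map_cons]
    by_cases hs : PySem.Str.strip l = ""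
    · by_cases hb0 : b = 0
      · subst hb0
        rw [show pvStepA (0, acc) l = (1, acc ++ [""]) from by simp [pvStepA, hs]]
        rw [ih 1 (acc ++ [""]) (by omega)]
        simp [pvCollapse, hs]
      · rw [show pvStepA (b, acc) l = (b + 1, acc) from by
          simp [pvStepA, hs, show ¬ (b + 1 ≤ 1) from by omega]]
        rw [ih (b + 1) acc (by omega)]
        simp [pvCollapse, hs, hb0, show b + 1 ≠ 0 from by omega]
    · rw [show pvStepA (b, acc) l = (0, acc ++ [PySem.Str.strip l]) from by simp [pvStepA, hs]]
      rw [ih 0 (acc ++ [PySem.Str.strip l]) le_rfl]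
      simp [pvCollapse, hs]

theorem pvB_zip (l : List String) : ∀ (p : Option String),
    ((((p :: l.map some).zip l).filter (fun q => q.2 != "" || q.1 != some "")).map (·.2))
    = pvCollapse (p == some "") l := by
  induction l with
  | nil => intro p; simp [pvCollapse]
  | cons s r ih =>
    intro p
    simp only [List.map_cons, List.zip_cons_cons, List.filter_cons]
    by_cases hs : s = ""
    · subst hs
      by_cases hp : p = some ""
      · subst hp; simpa [pvCollapse] using ih (some "")
      · have hpb : (p == some "") = false := by simpa using hp
        simp [pvCollapse, hpb, hp, ih (some "")]
    · have hsb : (s == "") = false := by simpa using hs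
      simp [pvCollapse, hs, hsb, ih (some s)]

-- ===== VERDICT (by name: the statement is the Claim_ definition above) =====
theorem clean_page_text_py_spec : Claim_equal_clean_page_text_py := by
  intro text _
  unfold Spec_clean_page_text_py clean_page_text_py clean_page_text_py_alt
  simp only [pvA_loop ((PySem.Str.split? text "\n").getD []) 0 [] le_rfl, pvB_zip]
  simp
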